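-- pv_equiv track=rewrite | github.com/L-SHawn91/shawn-bio-search | shawn_bio_search/search.py | _best_author_label
-- ===== SOURCE A (Python) =====
-- from typing import Any, Dict, List, Optional, Union
--
-- def _best_author_label(labels: List[str]) -> str:
--     if not labels:
--         return ""
--     labels = [x.strip() for x in labels if x and x.strip()]
--     if not labels:
--         return ""
--     # Prefer the longest label with at least one token longer than 1 char.
--     labels.sort(key=lambda s: (
--         any(len(tok) > 1 for tok in s.replace('.', ' ').split()),
--         len(s),
--     ), reverse=True)
--     return labels[0]
-- ===== SOURCE B (Python) =====
-- def _best_author_label(labels):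
--     # Single fused pass: track the first-longest label overall and the first-longest
--     # among labels having a token longer than 1 char; no intermediate lists, no sort.
--     best_all = None
--     best_pref = None
--     for raw in labels:
--         if not raw:
--             continue
--         s = raw.strip()
--         if not s:
--             continue
--         if best_all is None or len(s) > len(best_all):
--             best_all = s
--         if any(len(t) > 1 for t in s.replace('.', ' ').split()):
--             if best_pref is None or len(s) > len(best_pref):
--                 best_pref = s
--     if best_pref is not None:
--         return best_pref
--     if best_all is not None:
--         return best_all
--     return ""
-- ===== Notes on version B (the rewrite author's own statement) =====
-- stated objective: alternative
-- what changed: Replaces clean-then-stable-reverse-sort under a composite (has-long-token, length) key by one fused streaming pass that keeps two running accumulators (first-longest preferred label, first-longest overall) and never builds intermediate lists or sorts.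
import Mathlib
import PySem

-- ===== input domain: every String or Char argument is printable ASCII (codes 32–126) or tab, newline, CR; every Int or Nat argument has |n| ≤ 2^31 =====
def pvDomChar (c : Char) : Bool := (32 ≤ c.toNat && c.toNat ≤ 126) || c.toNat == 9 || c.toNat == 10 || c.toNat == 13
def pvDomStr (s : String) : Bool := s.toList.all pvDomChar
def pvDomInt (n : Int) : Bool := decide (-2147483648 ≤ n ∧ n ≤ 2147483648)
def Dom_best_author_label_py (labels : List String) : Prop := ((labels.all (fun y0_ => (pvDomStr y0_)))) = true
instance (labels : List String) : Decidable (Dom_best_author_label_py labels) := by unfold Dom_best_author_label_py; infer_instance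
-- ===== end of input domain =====

-- B replaces A's clean-then-stable-reverse-sort under a composite (has-long-token, length)
-- key by one fused streaming pass keeping two running accumulators; objective: alternative.


-- ===== PORT A =====
-- any(len(tok) > 1 for tok in s.replace('.', ' ').split())
def aHasLongTok (s : String) : Bool :=
  (PySem.Str.split₀ (PySem.Str.replace s "." " ")).any (fun tok => decide (1 < PySem.Str.len tok))

def best_author_label_py (labels : List String) : String :=
  if labels.isEmpty then ""
  else
    let cleaned := (labels.filter (fun x => !(x == "") && !(PySem.Str.strip x == ""))).map PySem.Str.strip
    if cleaned.isEmpty then ""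
    else
      -- labels.sort(key=lambda s: (any(...), len(s)), reverse=True); return labels[0]
      PySem.List.pyGetD
        (PySem.List.sorted2 cleaned (fun s => aHasLongTok s) (fun s => PySem.Str.len s) true) 0 ""

-- ===== PORT B =====
def bHasLongTok (s : String) : Bool :=
  (PySem.Str.split₀ (PySem.Str.replace s "." " ")).any (fun t => decide (1 < PySem.Str.len t))

-- 'best is None or len(s) > len(best)' → take s, else keep best
def bUpd (o : Option String) (s : String) : Option String :=
  match o with
  | none => some s
  | some m => if PySem.Str.len m < PySem.Str.len s then some s else some m

-- one iteration of B's loop over the raw label list (two continue guards, two accumulators)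
def bStep (st : Option String × Option String) (raw : String) : Option String × Option String :=
  if raw == "" then st
  else
    let s := PySem.Str.strip raw
    if s == "" then st
    else
      (bUpd st.1 s, if bHasLongTok s then bUpd st.2 s else st.2)

def best_author_label_py_alt (labels : List String) : String :=
  match labels.foldl bStep (none, none) with
  | (_, some p) => p
  | (some a, none) => a
  | (none, none) => ""

-- ===== PRECONDITION & SPEC =====
def Spec_best_author_label_py (labels : List String) (out : String) : Prop := out = best_author_label_py_alt labels
instance (labels : List String) (out : String) : Decidable (Spec_best_author_label_py labels out) := by unfold Spec_best_author_label_py; infer_instance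

-- ===== CLAIM (what is proved, stated in full; the proofs are below) =====
def Claim_equal_best_author_label_py : Prop := ∀ (labels : List String), Dom_best_author_label_py labels → Spec_best_author_label_py labels (best_author_label_py labels)

-- ===== LEMMAS AND PROOFS =====

def pvBefore (k1 : String → Bool) (k2 : String → Int) (a b : String) : Bool :=
  decide (k1 b < k1 a) || !decide (k1 a < k1 b) && decide (k2 b < k2 a)

def pvStep (before : String → String → Bool) (o : Option String) (x : String) : Option String :=
  match o with
  | none => some x
  | some m => if before x m then some x else some m

def pvRunMax (k : String → Int) (m : String) (ys : List String) : String :=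
  ys.foldl (fun m x => if k m < k x then x else m) m

theorem pvMax?_cons (k : String → Int) (y : String) (ys : List String) :
    PySem.List.max? (y :: ys) k = some (pvRunMax k y ys) := by
  show List.foldl _ (some y) ys = _
  induction ys generalizing y with
  | nil => rfl
  | cons z zs ih =>
      show List.foldl _ (if k y < k z then some z else some y) zs = _
      rw [show (if k y < k z then some z else some y) = some (if k y < k z then z else y) from by split <;> rfl]
      exact ih _

theorem pvFoldlInsertBy_head (before : String → String → Bool) (xs acc : List String) :
    (xs.foldl (fun a x => PySem.List.insertBy before x a) acc).head?
      = xs.foldl (pvStep before) acc.head? := by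
  induction xs generalizing acc with
  | nil => rfl
  | cons x xs ih =>
      rw [List.foldl_cons, List.foldl_cons, ih]
      congr 1
      cases acc with
      | nil => rfl
      | cons y ys =>
          show (if before x y then x :: y :: ys else y :: PySem.List.insertBy before x ys).head? = _
          by_cases h : before x y <;> simp [pvStep, h]

theorem pvMax2?_eq (k1 : String → Bool) (k2 : String → Int) (xs : List String) :
    PySem.List.max2? xs k1 k2 = xs.foldl (pvStep (pvBefore k1 k2)) none := by
  unfold PySem.List.max2?
  apply PySem.List.foldl_congr_mem
  intro acc x _
  cases acc <;> rfl

theorem pvSorted2RevHead (xs : List String) (k1 : String → Bool) (k2 : String → Int) :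
    (PySem.List.sorted2 xs k1 k2 true).head? = PySem.List.max2? xs k1 k2 := by
  rw [show PySem.List.sorted2 xs k1 k2 true
      = xs.foldl (fun a x => PySem.List.insertBy (pvBefore k1 k2) x a) [] from rfl]
  rw [pvFoldlInsertBy_head, pvMax2?_eq]
  rfl

theorem pvMax2Run (k1 : String → Bool) (k2 : String → Int) (xs : List String) (m : String) :
    xs.foldl (pvStep (pvBefore k1 k2)) (some m)
      = some (if k1 m then pvRunMax k2 m (xs.filter k1)
              else match xs.filter k1 with
                   | [] => pvRunMax k2 m xs
                   | y :: ys => pvRunMax k2 y ys) := by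
  induction xs generalizing m with
  | nil => cases hm : k1 m <;> simp [pvRunMax]
  | cons x xs ih =>
      have hstep : ∀ a b : String, pvStep (pvBefore k1 k2) (some a) b
          = some (if (decide (k1 a < k1 b) || !decide (k1 b < k1 a) && decide (k2 a < k2 b)) then b else a) := by
        intro a b; simp only [pvStep, pvBefore]; split <;> simp_all
      rw [List.foldl_cons, hstep]
      cases hm : k1 m <;> cases hx : k1 x <;>
        simp only [show decide ((false:Bool) < false) = false from by decide,
          show decide ((false:Bool) < true) = true from by decide,
          show decide ((true:Bool) < false) = false from by decide,
          show decide ((true:Bool) < true) = false from by decide,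
          Bool.false_or, Bool.true_or, Bool.not_true, Bool.not_false, Bool.true_and,
          Bool.false_and, Bool.or_false, decide_eq_true_eq, if_true, if_false,
          Bool.false_eq_true, List.filter_cons, hx]
      · -- both false
        rw [ih]
        have hk : k1 (if k2 m < k2 x then x else m) = false := by split <;> assumption
        rw [hk]
        simp only [Bool.false_eq_true, if_false]
        cases hF : xs.filter k1 with
        | nil => exact rfl
        | cons y ys => rfl
      · -- m false, x true
        rw [ih, hx]
        simp only [if_true]
      · -- m true, x false
        rw [ih, hm]
        simp only [if_true]
      · -- both true
        rw [ih]
        have hk : k1 (if k2 m < k2 x then x else m) = true := by split <;> assumption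
        rw [hk]
        simp only [if_true]
        rfl

theorem pvMax2?_twoPhase (k1 : String → Bool) (k2 : String → Int) (c : String) (cs : List String) :
    PySem.List.max2? (c :: cs) k1 k2
      = if ((c :: cs).filter k1).isEmpty then PySem.List.max? (c :: cs) k2
        else PySem.List.max? ((c :: cs).filter k1) k2 := by
  rw [pvMax2?_eq, List.foldl_cons,
    show pvStep (pvBefore k1 k2) none c = some c from rfl, pvMax2Run]
  cases hc : k1 c with
  | true =>
      simp only [List.filter_cons, hc, if_true, List.isEmpty_cons, ite_false, Bool.false_eq_true]
      rw [pvMax?_cons]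
  | false =>
      simp only [List.filter_cons, hc, Bool.false_eq_true, if_false]
      cases hF : cs.filter k1 with
      | nil => simp [pvMax?_cons]
      | cons y ys => simp [pvMax?_cons]

theorem pvGetD_zero (xs : List String) (d : String) :
    PySem.List.pyGetD xs 0 d = xs.head?.getD d := by
  cases xs <;> simp [PySem.List.pyGetD, PySem.List.pyGet?, PySem.List.pyIdx?]

-- B's running-max accumulator equals PySem.List.max? started from an option
theorem pvMax?_eq_foldl_bUpd (xs : List String) :
    PySem.List.max? xs (fun s => PySem.Str.len s) = xs.foldl bUpd none := by
  unfold PySem.List.max?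
  apply PySem.List.foldl_congr_mem
  intro acc x _
  cases acc <;> rfl

-- the fused-pass invariant: B's fold over the raw labels computes the two running maxima
-- over the cleaned list and over its preferred sublist
theorem pvBFold (labels : List String) (o1 o2 : Option String) :
    labels.foldl bStep (o1, o2)
      = (((labels.filter (fun x => !(x == "") && !(PySem.Str.strip x == ""))).map PySem.Str.strip).foldl bUpd o1,
         ((((labels.filter (fun x => !(x == "") && !(PySem.Str.strip x == ""))).map PySem.Str.strip).filter bHasLongTok).foldl bUpd o2)) := by
  induction labels generalizing o1 o2 with
  | nil => rfl
  | cons x xs ih =>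
      rw [List.foldl_cons]
      by_cases h1 : (x == "") = true
      · simp only [bStep, h1, if_true, List.filter_cons, Bool.not_true, Bool.false_and]
        rw [ih]
        simp
      · by_cases h2 : (PySem.Str.strip x == "") = true
        · simp only [bStep]
          rw [if_neg (by simp_all), if_pos h2, ih]
          have hkeep : (!(x == "") && !(PySem.Str.strip x == "")) = false := by simp [h2]
          simp [hkeep]
        · simp only [bStep]
          rw [if_neg (by simp_all), if_neg (by simp_all)]
          rw [ih]
          have hkeep : (!(x == "") && !(PySem.Str.strip x == "")) = true := by simp_all
          simp only [List.filter_cons, hkeep, if_true, List.map_cons, List.foldl_cons]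
          by_cases hp : bHasLongTok (PySem.Str.strip x) = true
          · simp [hp]
          · simp only [Bool.not_eq_true] at hp
            simp [hp]

-- ===== VERDICT (by name: the statement is the Claim_ definition above) =====
theorem best_author_label_py_spec : Claim_equal_best_author_label_py := by
  intro labels _
  show best_author_label_py labels = best_author_label_py_alt labels
  unfold best_author_label_py best_author_label_py_alt
  rw [pvBFold]
  rw [← pvMax?_eq_foldl_bUpd, ← pvMax?_eq_foldl_bUpd]
  cases h0 : labels.isEmpty
  · simp only [Bool.false_eq_true, if_false]
    cases hc : (labels.filter (fun x => !(x == "") && !(PySem.Str.strip x == ""))).map PySem.Str.strip with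
    | nil => rfl
    | cons c cs =>
        simp only [List.isEmpty_cons, Bool.false_eq_true, if_false]
        rw [pvGetD_zero, pvSorted2RevHead]
        rw [show (fun s => aHasLongTok s) = bHasLongTok from rfl]
        rw [pvMax2?_twoPhase bHasLongTok (fun s => PySem.Str.len s) c cs]
        by_cases hF : ((c :: cs).filter bHasLongTok).isEmpty = true
        · rw [if_pos hF]
          rw [List.isEmpty_iff] at hF
          rw [hF, pvMax?_cons]
          rfl
        · rw [if_neg hF]
          cases hfc : (c :: cs).filter bHasLongTok with
          | nil => exact absurd (by rw [hfc]; rfl) hF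
          | cons p ps => simp [pvMax?_cons]
  · rw [List.isEmpty_iff] at h0
    subst h0
    rfl
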